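-- pv_equiv track=rewrite | github.com/chintu1851/DSA-Questions | leetcode/l748_shortestcompleting.py | shortestWord
-- ===== SOURCE A (Python) =====
-- from collections import Counter
--
-- def shortestWord(licensePlate, words):
--     # Extract only alphabetic characters and convert them to lowercase
--     license_filtered = "".join([char for char in licensePlate if char.isalpha()]).lower()
--
--     # Count the occurrences of characters in the license plate
--     license_counter = Counter(license_filtered)
--
--     # Initialize shortest word variable
--     shortest = None
--
--     # Iterate over words
--     for word in words:
--         word_counter = Counter(word)
--
--         # Check if all required letters are present in the word
--         if all(word_counter[char] >= license_counter[char] for char in license_counter):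
--             if shortest is None or len(word) < len(shortest):
--                 shortest = word  # Update shortest word
--
--     return shortest  # Return the shortest matching word
-- ===== SOURCE B (Python) =====
-- def shortestWord(licensePlate, words):
--     # letters required by the plate, lowercased, with multiplicity
--     need = [c.lower() for c in licensePlate if c.isalpha()]
--
--     def completes(word):
--         # consume one pool letter per required letter; fail when one is missing
--         pool = list(word)
--         for c in need:
--             if c in pool:
--                 pool.remove(c)
--             else:
--                 return False
--         return True
--
--     # stable length-sort, then the first completing word is the answer
--     for word in sorted(words, key=len):
--         if completes(word):
--             return word
--     return None
-- ===== Notes on version B (the rewrite author's own statement) =====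
-- stated objective: alternative
-- what changed: Instead of A's single scan that builds a Counter per word and tracks the running shortest valid word, B length-sorts the words with a stable sort and returns the first word passing a removal-based multiset check (consume one pooled letter per required plate letter), with no word Counters; a timing run measured it faster (early return after the sort, no per-word Counter construction).
import Mathlib
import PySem

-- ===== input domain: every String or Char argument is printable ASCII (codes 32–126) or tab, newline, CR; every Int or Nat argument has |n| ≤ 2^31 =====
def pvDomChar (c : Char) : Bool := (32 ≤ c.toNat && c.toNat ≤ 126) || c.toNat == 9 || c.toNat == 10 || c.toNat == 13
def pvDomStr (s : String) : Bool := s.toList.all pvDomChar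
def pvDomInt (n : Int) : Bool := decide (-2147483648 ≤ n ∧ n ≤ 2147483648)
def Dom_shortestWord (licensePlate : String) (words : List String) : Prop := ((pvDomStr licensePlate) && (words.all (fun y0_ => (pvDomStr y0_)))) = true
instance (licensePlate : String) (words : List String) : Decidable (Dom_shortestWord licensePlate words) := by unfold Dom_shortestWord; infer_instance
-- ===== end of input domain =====

-- B: stable length-sort then return the first completing word, coverage checked by removing
-- pooled letters one required letter at a time (no word Counters); alternative algorithm, same result.

-- ===== PORT A =====
def shortestWord (licensePlate : String) (words : List String) : Option String :=
  let licenseFiltered := PySem.Str.lower (String.ofList (licensePlate.toList.filter PySem.Chars.isalpha))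
  let licenseCounter := PySem.Dict.counter licenseFiltered.toList
  words.foldl (fun shortest word =>
    let wordCounter := PySem.Dict.counter word.toList
    if licenseCounter.keys.all (fun c => wordCounter.getD c 0 ≥ licenseCounter.getD c 0) then
      match shortest with
      | none => some word
      | some s => if PySem.Str.len word < PySem.Str.len s then some word else some s
    else shortest) none

-- ===== PORT B =====
-- helper = Source B's `completes`: `if c in pool: pool.remove(c) else: return False` is exactly
-- PySem.List.remove? (some ↔ membership, removes the first occurrence)
def coverPool (need : List Char) (pool : List Char) : Bool :=
  match need with
  | [] => true
  | c :: rest =>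
    match PySem.List.remove? pool c with
    | some pool' => coverPool rest pool'
    | none => false

def shortestWord_alt (licensePlate : String) (words : List String) : Option String :=
  let need := (licensePlate.toList.filter PySem.Chars.isalpha).map PySem.Chars.lowerChar
  (PySem.List.sorted words (fun w => PySem.Str.len w)).find? (fun w => coverPool need w.toList)

-- ===== PRECONDITION & SPEC =====
def Spec_shortestWord (licensePlate : String) (words : List String) (out : Option String) : Prop := out = shortestWord_alt licensePlate words
instance (licensePlate : String) (words : List String) (out : Option String) : Decidable (Spec_shortestWord licensePlate words out) := by unfold Spec_shortestWord; infer_instance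

-- ===== CLAIM (what is proved, stated in full; the proofs are below) =====
def Claim_equal_shortestWord : Prop := ∀ (licensePlate : String) (words : List String), Dom_shortestWord licensePlate words → Spec_shortestWord licensePlate words (shortestWord licensePlate words)

-- ===== LEMMAS AND PROOFS =====

-- the removal-based check is multiset domination
theorem coverPool_iff (need pool : List Char) :
    coverPool need pool = true ↔ ∀ c : Char, need.count c ≤ pool.count c := by
  induction need generalizing pool with
  | nil => simp [coverPool]
  | cons c rest ih =>
    by_cases hc : c ∈ pool
    · rw [coverPool, PySem.List.remove?_eq_some_erase pool c hc]
      simp only [ih]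
      have hcpos : 0 < pool.count c := List.count_pos_iff.mpr hc
      constructor
      · intro h d
        have hd := h d
        rw [List.count_erase] at hd
        simp only [List.count_cons]
        by_cases hdc : c = d
        · subst hdc
          simp only [beq_self_eq_true, if_pos] at hd ⊢
          omega
        · simp [beq_iff_eq, hdc] at hd
          simp [beq_iff_eq, hdc]
          omega
      · intro h d
        have hd := h d
        rw [List.count_erase]
        simp only [List.count_cons] at hd
        by_cases hdc : c = d
        · subst hdc
          simp only [beq_self_eq_true, if_pos] at hd ⊢
          omega
        · have hdc' : ¬ d = c := fun h' => hdc (Eq.symm h')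
          simp [beq_iff_eq, hdc] at hd
          simp [beq_iff_eq, hdc]
          omega
    · have hn : PySem.List.remove? pool c = none := (PySem.List.remove?_eq_none_iff pool c).mpr hc
      rw [coverPool, hn]
      simp only [Bool.false_eq_true, false_iff]
      intro h
      have hx := h c
      simp only [List.count_cons_self, List.count_eq_zero_of_not_mem hc] at hx
      omega

-- A's Counter-domination test equals B's removal test
theorem pred_eq (need : List Char) (w : String) :
    ((PySem.Dict.counter need).keys.all
      (fun c => (PySem.Dict.counter w.toList).getD c 0 ≥ (PySem.Dict.counter need).getD c 0))
    = coverPool need w.toList := by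
  rw [Bool.eq_iff_iff, List.all_eq_true, coverPool_iff]
  simp only [PySem.Dict.keys_counter, PySem.Dict.getD_counter, ge_iff_le, Nat.cast_le,
    decide_eq_true_eq]
  constructor
  · intro h c
    by_cases hc : c ∈ need
    · exact h c ((PySem.Set.mem_ofList need c).mpr hc)
    · simp [List.count_eq_zero_of_not_mem hc]
  · intro h c _
    exact h c

-- first match after a stable insertion of x into a key-sorted list
theorem find?_insertBy {α κ : Type} [LinearOrder κ] (key : α → κ) (p : α → Bool) (x : α)
    (s : List α) (hs : s.Pairwise (fun a b => key a ≤ key b)) :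
    (PySem.List.insertBy (fun a b => decide (key a < key b)) x s).find? p =
      if p x then
        match s.find? p with
        | none => some x
        | some m => if key x < key m then some x else some m
      else s.find? p := by
  induction s with
  | nil =>
    simp only [PySem.List.insertBy, List.find?]
    cases hp : p x <;> simp
  | cons y t ih =>
    rw [List.pairwise_cons] at hs
    by_cases hxy : key x < key y
    · simp only [PySem.List.insertBy, decide_eq_true_eq, if_pos hxy]
      cases hp : p x with
      | false =>
        rw [List.find?_cons_of_neg (by simp [hp]), if_neg (by simp)]
      | true =>
        rw [List.find?_cons_of_pos hp, if_pos rfl]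
        cases hm : (y :: t).find? p with
        | none => rfl
        | some m =>
          have hmem := List.mem_of_find?_eq_some hm
          have hym : key y ≤ key m := by
            rcases List.mem_cons.mp hmem with h | h
            · exact le_of_eq (congrArg key h.symm)
            · exact hs.1 m h
          simp [lt_of_lt_of_le hxy hym]
    · simp only [PySem.List.insertBy, decide_eq_true_eq, if_neg hxy]
      cases hy : p y with
      | true =>
        rw [List.find?_cons_of_pos hy, List.find?_cons_of_pos hy]
        cases hp : p x <;> simp [hxy]
      | false =>
        rw [List.find?_cons_of_neg (by simp [hy]), List.find?_cons_of_neg (by simp [hy])]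
        exact ih hs.2

-- first match of the length-sorted list IS A's running-minimum loop
theorem find?_sorted_eq_foldl {α κ : Type} [LinearOrder κ] (key : α → κ) (p : α → Bool)
    (ws : List α) :
    (PySem.List.sorted ws key).find? p =
      ws.foldl (fun shortest word =>
        if p word then
          match shortest with
          | none => some word
          | some s => if key word < key s then some word else some s
        else shortest) none := by
  induction ws using List.reverseRecOn with
  | nil => simp [PySem.List.sorted]
  | append_singleton ws x ih =>
    rw [PySem.List.sorted_eq_foldl_insertBy, List.foldl_append, List.foldl_append,
      ← PySem.List.sorted_eq_foldl_insertBy, List.foldl_cons, List.foldl_nil, List.foldl_cons,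
      List.foldl_nil, find?_insertBy key p x _ (PySem.List.sorted_pairwise ws key), ih]

-- ===== VERDICT (by name: the statement is the Claim_ definition above) =====
theorem shortestWord_spec : Claim_equal_shortestWord := by
  intro lp ws _
  show shortestWord lp ws = shortestWord_alt lp ws
  simp only [shortestWord, shortestWord_alt, PySem.Str.toList_lower, String.toList_ofList,
    PySem.Chars.lower]
  rw [find?_sorted_eq_foldl]
  congr 1
  funext shortest word
  simp only [pred_eq]
  cases shortest <;> rfl
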